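-- pv_equiv track=rewrite | github.com/liang09255/tetris | pierre_dellacherie.py | _cal_boardRowTransitions
-- ===== SOURCE A (Python) =====
-- import copy
--
-- def _cal_boardRowTransitions(s: list) -> int:
--     s2 = copy.deepcopy(s)
--     # 添加左右两列
--     _fill_left_right(s2)
--     _to_one(s2)
--     # 计算行变换数
--     count = 0
--     for i in range(len(s2)):
--         for j in range(len(s2[i]) - 1):
--             if s2[i][j] != s2[i][j + 1]:
--                 count += 1
--     return count
--
-- def _to_one(s: list):
--     for i in range(len(s)):
--         for j in range(len(s[i])):
--             if s[i][j] != 0: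
--                 s[i][j] = 1
--
-- def _fill_left_right(s: list):
--     for i in range(len(s)):
--         if s[i].count(0) == len(s[i]):
--             s[i].insert(0, 0)
--             s[i].append(0)
--         else:
--             s[i].insert(0, 1)
--             s[i].append(1)
-- ===== SOURCE B (Python) =====
-- def _cal_boardRowTransitions(s: list) -> int:
--     # Closed form per row: transitions of the padded binarized row = 2 * (number of
--     # maximal runs of zeros in the row), and 0 for an all-zero row. One pass per row
--     # tracking run starts; no padding, no binarized copy, no adjacent comparisons.
--     total = 0
--     for row in s:
--         zruns = 0
--         nonzero = False
--         prev_zero = False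
--         for c in row:
--             if c == 0:
--                 if not prev_zero:
--                     zruns += 1
--                 prev_zero = True
--             else:
--                 nonzero = True
--                 prev_zero = False
--         if nonzero:
--             total += 2 * zruns
--     return total
-- ===== Notes on version B (the rewrite author's own statement) =====
-- stated objective: alternative
-- what changed: B replaces A's deepcopy + padding + binarization + adjacent-pair counting over the materialized padded matrix by a closed form: per row one pass counts the maximal zero-runs and whether any cell is nonzero, and adds 2 * zero-runs (0 for an all-zero row), since each zero-run of a padded row contributes exactly two transitions.
import Mathlib
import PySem

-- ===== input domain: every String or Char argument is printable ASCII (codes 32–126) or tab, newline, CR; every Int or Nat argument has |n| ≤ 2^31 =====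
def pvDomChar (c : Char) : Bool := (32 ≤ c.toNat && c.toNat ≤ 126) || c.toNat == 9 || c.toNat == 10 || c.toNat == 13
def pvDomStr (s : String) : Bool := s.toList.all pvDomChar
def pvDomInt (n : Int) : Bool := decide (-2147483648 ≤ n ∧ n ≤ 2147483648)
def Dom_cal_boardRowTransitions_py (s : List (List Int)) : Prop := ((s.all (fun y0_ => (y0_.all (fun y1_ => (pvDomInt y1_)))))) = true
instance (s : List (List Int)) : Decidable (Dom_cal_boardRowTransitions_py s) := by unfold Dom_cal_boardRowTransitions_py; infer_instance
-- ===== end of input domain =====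

-- B drops A's deepcopy/padding/binarization/adjacent-pair count and instead adds, per
-- row, 2 * (number of maximal zero-runs) when the row has a nonzero cell, else 0
-- (a closed form for the padded row's transition count); objective: alternative.
-- A mutates only its deepcopy, so both are side-effect free.

-- ===== PORT A =====
-- _fill_left_right, one row (condition read before the inserts, as in Python)
def pvFillLRRow (row : List Int) : List Int :=
  if PySem.List.count row 0 = row.length then 0 :: (row ++ [0]) else 1 :: (row ++ [1])

-- _to_one, one row (sets only nonzero cells to 1, leaves zeros as they are)
def pvToOneRow (row : List Int) : List Int :=
  row.map (fun c => if c ≠ 0 then 1 else c)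

def cal_boardRowTransitions_py (s : List (List Int)) : Int :=
  let s2 := s.map pvFillLRRow
  let s3 := s2.map pvToOneRow
  (PySem.List.pyRange 0 (s3.length : Int) 1).foldl (fun count i =>
    let row := PySem.List.pyGetD s3 i []
    (PySem.List.pyRange 0 ((row.length : Int) - 1) 1).foldl (fun c j =>
      if PySem.List.pyGetD row j 0 ≠ PySem.List.pyGetD row (j + 1) 0 then c + 1 else c) count) 0

-- ===== PORT B =====
-- inner loop state: (zruns, nonzero, prev_zero)
def pvRowStep (st : Int × Bool × Bool) (c : Int) : Int × Bool × Bool :=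
  if c = 0 then ((if st.2.2 then st.1 else st.1 + 1), st.2.1, true)
  else (st.1, true, false)

-- one row's contribution: 2*zruns if some cell is nonzero, else 0
def pvRowContrib (r : List Int) : Int :=
  let st := r.foldl pvRowStep (0, false, false)
  if st.2.1 then 2 * st.1 else 0

def cal_boardRowTransitions_py_alt (s : List (List Int)) : Int :=
  s.foldl (fun total row => total + pvRowContrib row) 0

-- ===== PRECONDITION & SPEC =====
def Spec_cal_boardRowTransitions_py (s : List (List Int)) (out : Int) : Prop := out = cal_boardRowTransitions_py_alt s
instance (s : List (List Int)) (out : Int) : Decidable (Spec_cal_boardRowTransitions_py s out) := by unfold Spec_cal_boardRowTransitions_py; infer_instance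

-- ===== CLAIM (what is proved, stated in full; the proofs are below) =====
def Claim_equal_cal_boardRowTransitions_py : Prop := ∀ (s : List (List Int)), Dom_cal_boardRowTransitions_py s → Spec_cal_boardRowTransitions_py s (cal_boardRowTransitions_py s)

-- ===== LEMMAS AND PROOFS =====

-- the padded binarized row A builds (border b, binarized interior, border b)
def pvSeqB (r : List Int) : List Int :=
  let b : Int := if r.any (fun c => decide (c ≠ 0)) then 1 else 0
  b :: (r.map (fun c => if c ≠ 0 then (1 : Int) else 0) ++ [b])

-- number of maximal zero-runs of r, given whether the previous cell was zero
def pvZN : List Int → Bool → Nat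
  | [], _ => 0
  | c :: r, pz => (if c = 0 ∧ pz = false then 1 else 0) + pvZN r (decide (c = 0))

-- zero-status of the last cell (pz if the list is empty)
def pvLS : List Int → Bool → Bool
  | [], pz => pz
  | c :: r, _ => pvLS r (decide (c = 0))

-- the two binarizations agree pointwise (the else branch of A's is only reached at 0)
lemma pvBinEq : (fun c : Int => if c ≠ 0 then (1 : Int) else c)
    = (fun c : Int => if c ≠ 0 then (1 : Int) else 0) := by
  funext c; by_cases hc : c = 0 <;> simp [hc]

-- A's two row passes (pad, then binarize) produce exactly the padded binarized row.
lemma pvRowEq (r : List Int) : pvToOneRow (pvFillLRRow r) = pvSeqB r := by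
  have hto : pvToOneRow = fun row : List Int => row.map (fun c : Int => if c ≠ 0 then (1 : Int) else 0) := by
    funext row; rw [pvToOneRow, pvBinEq]
  rw [hto]
  by_cases h : PySem.List.count r 0 = r.length
  all_goals simp only [PySem.List.count] at h
  · have hall : ∀ b ∈ r, (0 : Int) = b := List.count_eq_length.mp h
    have hex : ¬ ∃ x ∈ r, ¬ x = 0 := by
      rintro ⟨c, hc, hne⟩; exact hne (hall c hc).symm
    simp [pvFillLRRow, PySem.List.count, pvSeqB, h, hex]
  · have hc0 : ¬ (∀ b ∈ r, (0 : Int) = b) := fun hall => h (List.count_eq_length.mpr hall)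
    have hex : ∃ x ∈ r, ¬ x = 0 := by
      by_contra hno
      exact hc0 (fun b hb => by
        by_contra hb0
        exact hno ⟨b, hb, fun h0 => hb0 (h0 ▸ rfl)⟩)
    simp [pvFillLRRow, PySem.List.count, pvSeqB, h, hex]

-- index-pair count over range(len p - 1) = adjacent-pair count over zip p p.tail
lemma pvRangeZip (p : List Int) :
    (List.range (p.length - 1)).countP (fun k => decide (p.getD k 0 ≠ p.getD (k + 1) 0))
      = (p.zip p.tail).countP (fun q => decide (q.1 ≠ q.2)) := by
  induction p with
  | nil => simp
  | cons x xs ih =>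
    cases xs with
    | nil => simp
    | cons y t =>
      have hih := ih
      simp only [List.length_cons, Nat.add_sub_cancel, List.tail_cons] at hih ⊢
      rw [List.range_succ_eq_map, List.countP_cons, List.countP_map,
        List.zip_cons_cons, List.countP_cons]
      simp only [Function.comp_def, Nat.succ_eq_add_one, List.getD_cons_succ,
        List.getD_cons_zero]
      simp only [List.getD_cons_succ] at hih
      rw [hih]

-- A's inner index loop, rewritten as the adjacent-pair count
lemma pvInnerLoop (p : List Int) (init : Int) :
    (PySem.List.pyRange 0 ((p.length : Int) - 1) 1).foldl (fun c j =>
        if PySem.List.pyGetD p j 0 ≠ PySem.List.pyGetD p (j + 1) 0 then c + 1 else c) init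
      = init + ((p.zip p.tail).countP (fun q => decide (q.1 ≠ q.2)) : Int) := by
  cases p with
  | nil =>
    rw [show ((List.length ([] : List Int) : Int) - 1) = -1 by simp,
      PySem.List.pyRange_one_eq_nil (by norm_num : (-1 : Int) ≤ 0)]
    simp
  | cons x xs =>
    rw [show ((List.length (x :: xs) : Int) - 1) = (xs.length : Int) by push_cast [List.length_cons]; ring,
      PySem.List.pyRange_one, List.foldl_map,
      show (((xs.length : Int)) - 0).toNat = xs.length by omega]
    have hfun : (fun (c : Int) (k : Nat) =>
        if PySem.List.pyGetD (x :: xs) (0 + (k : Int)) 0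
            ≠ PySem.List.pyGetD (x :: xs) (0 + (k : Int) + 1) 0 then c + 1 else c)
      = (fun (c : Int) (k : Nat) =>
        if (fun k => decide ((x :: xs).getD k 0 ≠ (x :: xs).getD (k + 1) 0)) k then c + 1 else c) := by
      funext c k
      rw [show (0 : Int) + (k : Int) = ((k : Nat) : Int) by ring]
      rw [show ((k : Nat) : Int) + 1 = (((k + 1) : Nat) : Int) by push_cast; ring]
      rw [PySem.List.pyGetD_natCast, PySem.List.pyGetD_natCast]
      simp
    rw [hfun, PySem.List.foldl_count_if]
    rw [show xs.length = (x :: xs).length - 1 by simp, pvRangeZip]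

-- adjacent-pair count of (head, binarized r, trailing 1) = 2*zeroruns + initial status
lemma pvMainN (r : List Int) (pz : Bool) :
    (let p := (if pz then (0 : Int) else 1) :: (r.map (fun c => if c ≠ 0 then (1 : Int) else 0) ++ [1]);
     (p.zip p.tail).countP (fun q => decide (q.1 ≠ q.2)))
      = 2 * pvZN r pz + (if pz then 1 else 0) := by
  induction r generalizing pz with
  | nil => cases pz <;> simp [pvZN]
  | cons c r ih =>
    have hih := ih (decide (c = 0))
    by_cases hc : c = 0 <;> cases pz <;>
      simp [pvZN, hc, List.zip_cons_cons] at hih ⊢ <;>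
      omega

-- the B fold's state, characterized
lemma pvFold (r : List Int) (z0 : Int) (nz0 pz0 : Bool) :
    r.foldl pvRowStep (z0, nz0, pz0)
      = (z0 + (pvZN r pz0 : Int), nz0 || r.any (fun c => decide (c ≠ 0)), pvLS r pz0) := by
  induction r generalizing z0 nz0 pz0 with
  | nil => simp [pvZN, pvLS]
  | cons c r ih =>
    by_cases hc : c = 0 <;> cases pz0 <;>
      simp [pvRowStep, pvZN, pvLS, hc, ih, Prod.ext_iff] <;>
      omega

-- an all-equal-to-zero list has no unequal adjacent pair
lemma pvAllZero (p : List Int) (h : ∀ x ∈ p, x = 0) :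
    (p.zip p.tail).countP (fun q => decide (q.1 ≠ q.2)) = 0 := by
  induction p with
  | nil => simp
  | cons a t ih =>
    cases t with
    | nil => simp
    | cons b t' =>
      have ha : a = 0 := h a (by simp)
      have hb : b = 0 := h b (by simp)
      have ht := ih (fun x hx => h x (List.mem_cons_of_mem _ hx))
      subst ha; subst hb
      simp only [List.tail_cons] at ht
      simp only [List.tail_cons, List.zip_cons_cons, List.countP_cons, ht]
      norm_num

-- the closed form: the padded row's transition count is B's row contribution
lemma pvRowLem (r : List Int) :
    (((pvSeqB r).zip (pvSeqB r).tail).countP (fun q => decide (q.1 ≠ q.2)) : Int)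
      = pvRowContrib r := by
  by_cases h : r.any (fun c => decide (c ≠ 0)) = true
  · have hm := pvMainN r false
    simp only [if_neg (Bool.false_ne_true), Nat.add_zero] at hm
    simp only [pvSeqB, h, if_pos]
    rw [hm]
    simp only [pvRowContrib, pvFold, h, Bool.false_or, if_pos]
    push_cast; ring
  · have hall : ∀ x ∈ r, x = (0 : Int) := by
      intro x hx
      by_contra hne
      exact h (List.any_eq_true.mpr ⟨x, hx, by simpa using hne⟩)
    have hseq : ∀ x ∈ pvSeqB r, x = (0 : Int) := by
      intro x hx
      simp only [pvSeqB, h, if_neg, Bool.false_eq_true, not_false_eq_true] at hx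
      rcases List.mem_cons.mp hx with h0 | hx'
      · exact h0
      · rcases List.mem_append.mp hx' with hm | hm
        · rcases List.mem_map.mp hm with ⟨c, hc, hcx⟩
          rw [hall c hc] at hcx; simpa using hcx.symm
        · simpa using hm
    have h' : r.any (fun c => decide (c ≠ 0)) = false := by simpa using h
    rw [pvAllZero _ hseq]
    unfold pvRowContrib
    rw [pvFold, h']
    simp

-- ===== VERDICT (by name: the statement is the Claim_ definition above) =====
theorem cal_boardRowTransitions_py_spec : Claim_equal_cal_boardRowTransitions_py := by
  intro s _
  unfold Spec_cal_boardRowTransitions_py cal_boardRowTransitions_py cal_boardRowTransitions_py_alt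
  simp only []
  rw [PySem.List.foldl_pyRange_zero_pyGetD' ((s.map pvFillLRRow).map pvToOneRow) []
    (fun count row => (PySem.List.pyRange 0 ((row.length : Int) - 1) 1).foldl (fun c j =>
      if PySem.List.pyGetD row j 0 ≠ PySem.List.pyGetD row (j + 1) 0 then c + 1 else c) count) 0]
  rw [List.foldl_map, List.foldl_map]
  have hfun : (fun (count : Int) (r : List Int) =>
      (PySem.List.pyRange 0 (((pvToOneRow (pvFillLRRow r)).length : Int) - 1) 1).foldl (fun c j =>
        if PySem.List.pyGetD (pvToOneRow (pvFillLRRow r)) j 0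
            ≠ PySem.List.pyGetD (pvToOneRow (pvFillLRRow r)) (j + 1) 0 then c + 1 else c) count)
    = (fun (total : Int) (row : List Int) => total + pvRowContrib row) := by
    funext count r
    rw [pvRowEq, pvInnerLoop, pvRowLem]
  rw [hfun]
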